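-- pv_equiv track=rewrite | github.com/AlexandrovLab/SigProfilerTopography | SigProfilerTopography/source/plotting/TranscriptionReplicationStrandBiasFigures.py | fillDictWRTReferenceTypes
-- ===== SOURCE A (Python) =====
-- def fillDictWRTReferenceTypes(types,strands,type2Strand2CountDict):
--     strand2TypeCountListDict= {}
--
--     for strand in strands:
--         strand2TypeCountListDict[strand] = []
--         for type in types:
--             if type in type2Strand2CountDict:
--                 if strand in type2Strand2CountDict[type]:
--                     count = type2Strand2CountDict[type][strand]
--                     strand2TypeCountListDict[strand].append(count)
--                 else:
--                     strand2TypeCountListDict[strand].append(0)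
--             else:
--                 strand2TypeCountListDict[strand].append(0)
--
--     return strand2TypeCountListDict
-- ===== SOURCE B (Python) =====
-- def fillDictWRTReferenceTypes(types, strands, type2Strand2CountDict):
--     positions = {}
--     for i, t in enumerate(types):
--         positions.setdefault(t, []).append(i)
--     result = {strand: [0] * len(types) for strand in strands}
--     for t, strand2count in type2Strand2CountDict.items():
--         for i in positions.get(t, ()):
--             for strand, count in strand2count.items():
--                 row = result.get(strand)
--                 if row is not None:
--                     row[i] = count
--     return result
-- ===== Notes on version B (the rewrite author's own statement) =====
-- stated objective: alternative
-- what changed: B builds a type-to-column-index map and preallocates a zero row per strand, then scatters only the counts actually present in the nested dict, instead of probing the nested dict for every strand x type cell; Pre_ only excludes association lists with duplicate dict keys, which represent no Python dict.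
import Mathlib
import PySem

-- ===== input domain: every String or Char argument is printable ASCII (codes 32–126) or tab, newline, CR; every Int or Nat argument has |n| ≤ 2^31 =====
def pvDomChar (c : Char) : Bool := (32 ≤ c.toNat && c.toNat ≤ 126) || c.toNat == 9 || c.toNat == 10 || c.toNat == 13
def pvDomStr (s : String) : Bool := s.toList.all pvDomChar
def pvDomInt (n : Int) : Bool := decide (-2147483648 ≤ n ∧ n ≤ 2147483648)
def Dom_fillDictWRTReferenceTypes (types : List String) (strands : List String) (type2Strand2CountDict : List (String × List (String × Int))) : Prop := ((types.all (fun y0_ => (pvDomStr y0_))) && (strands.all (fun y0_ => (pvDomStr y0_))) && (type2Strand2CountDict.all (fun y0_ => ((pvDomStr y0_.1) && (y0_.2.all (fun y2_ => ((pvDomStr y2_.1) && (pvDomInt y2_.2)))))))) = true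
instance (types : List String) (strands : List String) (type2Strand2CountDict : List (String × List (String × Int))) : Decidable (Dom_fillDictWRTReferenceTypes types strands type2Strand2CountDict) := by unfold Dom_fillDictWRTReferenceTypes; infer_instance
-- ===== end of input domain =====

-- B builds a type→column index map and scatters only the counts present in the nested dict into
-- preallocated zero rows, instead of probing the dict for every strand × type cell (objective: alternative).

-- ===== PORT A =====
def fillDictWRTReferenceTypes (types : List String) (strands : List String) (type2Strand2CountDict : List (String × List (String × Int))) : List (String × List Int) :=
  (strands.foldl (fun acc strand =>
      types.foldl (fun acc2 ty =>
          match (PySem.Dict.mk type2Strand2CountDict).get? ty with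
          | some sub =>
            match (PySem.Dict.mk sub).get? strand with
            | some count => acc2.modify strand [] (fun l => l ++ [count])
            | none => acc2.modify strand [] (fun l => l ++ [0])
          | none => acc2.modify strand [] (fun l => l ++ [0]))
        (acc.insert strand ([] : List Int)))
    PySem.Dict.empty).items

-- ===== PORT B =====
-- Python's `for i, t in enumerate(types)` is ported over `types.zipIdx` (Nat indices; exact, Python's
-- indices here are ≥ 0); `positions.get(t, ())` is `positions.getD t []`.
def fillDictWRTReferenceTypes_alt (types : List String) (strands : List String) (type2Strand2CountDict : List (String × List (String × Int))) : List (String × List Int) :=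
  let positions : PySem.Dict String (List Nat) :=
    types.zipIdx.foldl (fun d p => d.modify p.1 [] (fun x => x ++ [p.2])) PySem.Dict.empty
  let result0 : PySem.Dict String (List Int) :=
    strands.foldl (fun r strand => r.insert strand (List.replicate types.length 0)) PySem.Dict.empty
  let result : PySem.Dict String (List Int) :=
    type2Strand2CountDict.foldl (fun r p =>
      (positions.getD p.1 []).foldl (fun r i =>
        p.2.foldl (fun r q =>
          match r.get? q.1 with
          | some row => r.insert q.1 (row.set i q.2)
          | none => r) r) r) result0
  result.items

-- ===== PRECONDITION & SPEC =====
-- Pre_ excludes association lists carrying a duplicate dictionary key (in the outer dict or in one of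
-- its sub-dicts): such lists represent no Python dict (dict keys are unique), so A's Python is never
-- run on them; on them the two ports' first-match vs. overwrite readings of the same dict diverge.
def Pre_fillDictWRTReferenceTypes (types : List String) (strands : List String) (type2Strand2CountDict : List (String × List (String × Int))) : Prop :=
  (type2Strand2CountDict.map Prod.fst).Nodup ∧ ∀ p ∈ type2Strand2CountDict, (p.2.map Prod.fst).Nodup
instance (types : List String) (strands : List String) (type2Strand2CountDict : List (String × List (String × Int))) : Decidable (Pre_fillDictWRTReferenceTypes types strands type2Strand2CountDict) := by unfold Pre_fillDictWRTReferenceTypes; infer_instance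

def pvWitness_fillDictWRTReferenceTypes : List String × List String × (List (String × List (String × Int))) :=
  (["a", "b"], ["x", "y"], [("a", [("x", 3)]), ("c", [("y", 5)])])

def Spec_fillDictWRTReferenceTypes (types : List String) (strands : List String) (type2Strand2CountDict : List (String × List (String × Int))) (out : List (String × List Int)) : Prop := out = fillDictWRTReferenceTypes_alt types strands type2Strand2CountDict
instance (types : List String) (strands : List String) (type2Strand2CountDict : List (String × List (String × Int))) (out : List (String × List Int)) : Decidable (Spec_fillDictWRTReferenceTypes types strands type2Strand2CountDict out) := by unfold Spec_fillDictWRTReferenceTypes; infer_instance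

-- ===== CLAIM (what is proved, stated in full; the proofs are below) =====
def Claim_equal_fillDictWRTReferenceTypes : Prop := ∀ (types : List String) (strands : List String) (type2Strand2CountDict : List (String × List (String × Int))), Dom_fillDictWRTReferenceTypes types strands type2Strand2CountDict → Pre_fillDictWRTReferenceTypes types strands type2Strand2CountDict → Spec_fillDictWRTReferenceTypes types strands type2Strand2CountDict (fillDictWRTReferenceTypes types strands type2Strand2CountDict)

-- ===== LEMMAS AND PROOFS =====

-- the value A puts in the cell for strand s and type t
def fCell (D : List (String × List (String × Int))) (s t : String) : Int :=
  match (PySem.Dict.mk D).get? t with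
  | some sub => ((PySem.Dict.mk sub).get? s).getD 0
  | none => 0

-- the columns of type t (all indices i with types[i] = t)
def idxsOf (types : List String) (t : String) : List Nat :=
  (types.zipIdx.filter (fun p => p.1 == t)).map (·.2)

theorem mem_idxsOf (L : List String) (t : String) (j : Nat) : j ∈ idxsOf L t ↔ L[j]? = some t := by
  simp only [idxsOf, List.mem_map, List.mem_filter, beq_iff_eq]
  constructor
  · rintro ⟨⟨x, i⟩, ⟨hmem, hx⟩, rfl⟩
    subst hx
    exact List.mk_mem_zipIdx_iff_getElem?.mp hmem
  · intro h
    exact ⟨(t, j), ⟨List.mk_mem_zipIdx_iff_getElem?.mpr h, rfl⟩, rfl⟩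

theorem foldl_len {β : Type} (step : List Int → β → List Int)
    (h : ∀ v x, (step v x).length = v.length) :
    ∀ (l : List β) (v : List Int), (l.foldl step v).length = v.length := by
  intro l
  induction l with
  | nil => intro v; rfl
  | cons x l ih => intro v; rw [List.foldl_cons, ih, h]

theorem foldl_getElem?_invar {β : Type} (j : Nat) (l : List β) (step : List Int → β → List Int)
    (h : ∀ v x, x ∈ l → (step v x)[j]? = v[j]?) :
    ∀ v : List Int, (l.foldl step v)[j]? = v[j]? := by
  induction l with
  | nil => intro v; rfl
  | cons x l ih =>
    intro v
    rw [List.foldl_cons, ih (fun v x hx => h v x (List.mem_cons_of_mem _ hx))]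
    exact h v x List.mem_cons_self

theorem keys_foldl_of_keys_eq {β : Type} (step : PySem.Dict String (List Int) → β → PySem.Dict String (List Int))
    (h : ∀ a x, (step a x).keys = a.keys) :
    ∀ (l : List β) (a : PySem.Dict String (List Int)), (l.foldl step a).keys = a.keys := by
  intro l
  induction l with
  | nil => intro a; rfl
  | cons x l ih => intro a; rw [List.foldl_cons, ih, h]

-- projecting a dict-level fold to the value held at a fixed key s
theorem getD_foldl_proj {β : Type} (s : String)
    (stepd : PySem.Dict String (List Int) → β → PySem.Dict String (List Int))
    (stepv : List Int → β → List Int)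
    (hk : ∀ a x, (stepd a x).keys = a.keys)
    (h2 : ∀ a x, a.contains s = true → (stepd a x).getD s [] = stepv (a.getD s []) x) :
    ∀ (l : List β) (a : PySem.Dict String (List Int)), a.contains s = true →
      (l.foldl stepd a).getD s [] = l.foldl stepv (a.getD s []) := by
  intro l
  induction l with
  | nil => intro a _; rfl
  | cons x l ih =>
    intro a ha
    rw [List.foldl_cons, List.foldl_cons, ih _ ?_, h2 a x ha]
    · rw [PySem.Dict.contains_iff_mem_keys] at ha ⊢
      rw [hk]; exact ha

-- the atomic write of B's scatter loop
theorem atomic_keys (r : PySem.Dict String (List Int)) (q : String × Int) (i : Nat) :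
    (match r.get? q.1 with
      | some row => r.insert q.1 (row.set i q.2)
      | none => r).keys = r.keys := by
  cases h : r.get? q.1 with
  | none => rfl
  | some row =>
    exact PySem.Dict.keys_insert_of_contains r _ (by rw [PySem.Dict.contains_eq_isSome_get?, h]; rfl)

theorem atomic_getD (s : String) (r : PySem.Dict String (List Int)) (q : String × Int) (i : Nat)
    (hs : r.contains s = true) :
    (match r.get? q.1 with
      | some row => r.insert q.1 (row.set i q.2)
      | none => r).getD s [] = (if q.1 == s then (r.getD s []).set i q.2 else r.getD s []) := by
  cases h : r.get? q.1 with
  | none =>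
    by_cases hq : q.1 = s
    · subst hq
      rw [PySem.Dict.get?_eq_none_iff_contains] at h
      rw [hs] at h; cases h
    · simp [beq_iff_eq, hq]
  | some row =>
    rw [PySem.Dict.getD_insert]
    have hrow : r.getD q.1 [] = row := PySem.Dict.getD_of_get?_eq_some r [] h
    by_cases hq : q.1 = s
    · subst hq; simp [hrow]
    · simp [beq_iff_eq, hq, Ne.symm hq]

-- value-level form of the inner strand loop, for a sub-dict without duplicate keys
theorem subfold_id (s : String) (i : Nat) :
    ∀ (sub : List (String × Int)), (∀ q ∈ sub, (q.1 == s) = false) →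
    ∀ v : List Int, sub.foldl (fun v q => if q.1 == s then v.set i q.2 else v) v = v := by
  intro sub
  induction sub with
  | nil => intro _ v; rfl
  | cons q sub ih =>
    intro h v
    rw [List.foldl_cons, h q List.mem_cons_self]
    exact ih (fun q hq => h q (List.mem_cons_of_mem _ hq)) v

theorem subfold_eq (s : String) (i : Nat) :
    ∀ (sub : List (String × Int)), (sub.map Prod.fst).Nodup →
    ∀ v : List Int,
      sub.foldl (fun v q => if q.1 == s then v.set i q.2 else v) v
        = match (PySem.Dict.mk sub).get? s with
          | some c => v.set i c
          | none => v := by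
  intro sub
  induction sub with
  | nil => intro _ v; rfl
  | cons q sub ih =>
    intro hnd v
    rw [List.map_cons, List.nodup_cons] at hnd
    rw [List.foldl_cons]
    rcases q with ⟨k, c⟩
    rw [PySem.Dict.get?_mk_cons]
    by_cases hk : k = s
    · have hks : (k == s) = true := by simp [hk]
      simp only [hks, if_true]
      refine subfold_id s i sub (fun q hq => ?_) (v.set i c)
      simp only [beq_eq_false_iff_ne]
      intro hqk
      have hm : q.1 ∈ sub.map Prod.fst := List.mem_map_of_mem hq
      rw [hqk, ← hk] at hm
      exact hnd.1 hm
    · have hks : (k == s) = false := by simp [hk]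
      simp only [hks, Bool.false_eq_true, if_false]
      exact ih hnd.2 v

-- a fold of writes of the same value: what position j ends up holding
theorem setfold_getElem? (c : Int) (j : Nat) :
    ∀ (idxs : List Nat) (v : List Int),
      (idxs.foldl (fun v i => v.set i c) v)[j]? = if j ∈ idxs then (v.set j c)[j]? else v[j]? := by
  intro idxs
  induction idxs with
  | nil => intro v; simp
  | cons i idxs ih =>
    intro v
    rw [List.foldl_cons, ih]
    by_cases hj : j ∈ idxs
    · simp only [hj, if_true, List.mem_cons, or_true]
      simp [List.getElem?_set, List.length_set]
    · by_cases hij : i = j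
      · subst hij
        simp [hj]
      · rw [List.getElem?_set_ne hij]
        have hnm : j ∉ i :: idxs := by
          intro h
          rcases List.mem_cons.mp h with h1 | h2
          · exact hij h1.symm
          · exact hj h2
        rw [if_neg hj, if_neg hnm]

-- B's per-entry step at value level
def eStepV (L : List String) (s : String) (v : List Int) (p : String × List (String × Int)) : List Int :=
  (idxsOf L p.1).foldl (fun v i =>
    p.2.foldl (fun v q => if q.1 == s then v.set i q.2 else v) v) v

theorem eStepV_len (L : List String) (s : String) (v : List Int) (p : String × List (String × Int)) :
    (eStepV L s v p).length = v.length := by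
  unfold eStepV
  refine foldl_len _ (fun v i => ?_) _ v
  refine foldl_len _ (fun v q => ?_) _ v
  by_cases h : q.1 == s <;> simp [h]

theorem eStepV_preserve (L : List String) (s : String) (j : Nat)
    (p : String × List (String × Int)) (hnd : (p.2.map Prod.fst).Nodup)
    (hj : j ∉ idxsOf L p.1) (v : List Int) :
    (eStepV L s v p)[j]? = v[j]? := by
  unfold eStepV
  have hfun : (fun (v : List Int) (i : Nat) =>
      p.2.foldl (fun v q => if q.1 == s then v.set i q.2 else v) v)
      = (fun (v : List Int) (i : Nat) =>
          match (PySem.Dict.mk p.2).get? s with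
          | some c => v.set i c
          | none => v) := by
    funext v i
    exact subfold_eq s i p.2 hnd v
  rw [hfun]
  cases hs : (PySem.Dict.mk p.2).get? s with
  | none =>
    simp only [hs]
    refine foldl_getElem?_invar j _ _ (fun v i _ => rfl) v
  | some c =>
    simp only [hs]
    refine foldl_getElem?_invar j _ _ (fun v i hi => ?_) v
    have : i ≠ j := fun h => hj (h ▸ hi)
    exact List.getElem?_set_ne this

theorem scatterV_some (L : List String) (s : String) (j : Nat) (tj : String)
    (hj : L[j]? = some tj) :
    ∀ (D : List (String × List (String × Int))), (D.map Prod.fst).Nodup →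
      (∀ p ∈ D, (p.2.map Prod.fst).Nodup) →
      ∀ v : List Int, j < v.length →
      (D.foldl (eStepV L s) v)[j]?
        = match (PySem.Dict.mk D).get? tj with
          | none => v[j]?
          | some sub =>
            match (PySem.Dict.mk sub).get? s with
            | some c => some c
            | none => v[j]? := by
  intro D
  induction D with
  | nil => intro _ _ v _; rfl
  | cons p D ih =>
    intro hnd hsub v hv
    rw [List.map_cons, List.nodup_cons] at hnd
    rcases p with ⟨t, sub⟩
    rw [List.foldl_cons, PySem.Dict.get?_mk_cons]
    have hndsub : (sub.map Prod.fst).Nodup := hsub _ List.mem_cons_self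
    have hsub' : ∀ p ∈ D, (p.2.map Prod.fst).Nodup :=
      fun p hp => hsub p (List.mem_cons_of_mem _ hp)
    by_cases ht : t = tj
    · subst ht
      simp only [beq_self_eq_true, if_true]
      have hmem : j ∈ idxsOf L t := (mem_idxsOf L t j).mpr hj
      have hfun : (fun (v : List Int) (i : Nat) =>
          sub.foldl (fun v q => if q.1 == s then v.set i q.2 else v) v)
          = (fun (v : List Int) (i : Nat) =>
              match (PySem.Dict.mk sub).get? s with
              | some c => v.set i c
              | none => v) := by
        funext v i
        exact subfold_eq s i sub hndsub v
      have hnone : (PySem.Dict.mk D).get? t = none := by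
        simp only [PySem.Dict.get?, Option.map_eq_none_iff, List.find?_eq_none, beq_iff_eq]
        intro q hq hqt
        have hm : q.1 ∈ D.map Prod.fst := List.mem_map_of_mem hq
        rw [hqt] at hm
        exact hnd.1 hm
      cases hs : (PySem.Dict.mk sub).get? s with
      | none =>
        have hstep : eStepV L s v (t, sub) = v := by
          unfold eStepV; rw [hfun]
          simp only [hs]
          simp
        rw [hstep, ih hnd.2 hsub' v hv, hnone]
      | some c =>
        have hstep : (eStepV L s v (t, sub))[j]? = some c := by
          unfold eStepV; rw [hfun]
          simp only [hs]
          rw [setfold_getElem? c j _ v]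
          rw [if_pos hmem, List.getElem?_set_self hv]
        have hlen : j < (eStepV L s v (t, sub)).length := by rw [eStepV_len]; exact hv
        rw [ih hnd.2 hsub' _ hlen, hnone, hstep]
    · have hjt : j ∉ idxsOf L t := by
        rw [mem_idxsOf, hj]
        intro h
        exact ht (Option.some.inj h).symm
      have hstep : (eStepV L s v (t, sub))[j]? = v[j]? := eStepV_preserve L s j _ hndsub hjt v
      have hlen : j < (eStepV L s v (t, sub)).length := by rw [eStepV_len]; exact hv
      have ht' : (t == tj) = false := by simp [ht]
      rw [ht', if_neg (by simp)]
      rw [ih hnd.2 hsub' _ hlen, hstep]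

theorem scatterV (L : List String) (s : String) (D : List (String × List (String × Int)))
    (hnd : (D.map Prod.fst).Nodup) (hsub : ∀ p ∈ D, (p.2.map Prod.fst).Nodup) :
    D.foldl (eStepV L s) (List.replicate L.length 0) = L.map (fCell D s) := by
  apply List.ext_getElem?
  intro j
  by_cases hjl : j < L.length
  · obtain ⟨tj, hj⟩ : ∃ tj, L[j]? = some tj :=
      ⟨L[j], List.getElem?_eq_getElem hjl⟩
    have hv : j < (List.replicate L.length (0 : Int)).length := by
      rw [List.length_replicate]; exact hjl
    rw [scatterV_some L s j tj hj D hnd hsub _ hv]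
    have hrep : (List.replicate L.length (0 : Int))[j]? = some 0 := by
      rw [List.getElem?_replicate, if_pos hjl]
    have hmapj : (L.map (fCell D s))[j]? = some (fCell D s tj) := by
      rw [List.getElem?_map, hj]; rfl
    rw [hmapj]
    unfold fCell
    cases hD : (PySem.Dict.mk D).get? tj with
    | none => simp only [hrep]
    | some sub =>
      cases hs : (PySem.Dict.mk sub).get? s with
      | none => simp only [hs, hrep, Option.getD_none]
      | some c => simp only [hs, Option.getD_some]
  · have hL : L[j]? = none := by
      rw [List.getElem?_eq_none_iff]; omega
    have hlhs : (D.foldl (eStepV L s) (List.replicate L.length 0))[j]? = none := by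
      rw [foldl_getElem?_invar j D _ (fun v p hp => ?_)]
      · rw [List.getElem?_replicate, if_neg hjl]
      · refine eStepV_preserve L s j p (hsub p hp) ?_ v
        rw [mem_idxsOf, hL]
        simp
    rw [hlhs, List.getElem?_map, hL]
    rfl

-- A's inner loop builds exactly the row of cells
theorem modfold (s : String) (g : String → Int) :
    ∀ (L : List String) (b : PySem.Dict String (List Int)) (v : List Int),
      L.foldl (fun b t => b.modify s [] (fun l => l ++ [g t])) (b.insert s v)
        = b.insert s (v ++ L.map g) := by
  intro L
  induction L with
  | nil => intro b v; simp
  | cons t L ih =>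
    intro b v
    rw [List.foldl_cons]
    have : (b.insert s v).modify s [] (fun l => l ++ [g t]) = b.insert s (v ++ [g t]) := by
      unfold PySem.Dict.modify
      rw [PySem.Dict.getD_insert_self, PySem.Dict.insert_insert_self]
    rw [this, ih, List.map_cons]
    congr 1
    simp

theorem getD_foldl_insert_fun (g : String → List Int) :
    ∀ (S : List String) (d : PySem.Dict String (List Int)) (k : String),
      (S.foldl (fun a x => a.insert x (g x)) d).getD k [] = if k ∈ S then g k else d.getD k [] := by
  intro S
  induction S with
  | nil => intro d k; simp
  | cons x S ih =>
    intro d k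
    rw [List.foldl_cons, ih]
    by_cases hk : k ∈ S
    · simp [hk, List.mem_cons]
    · by_cases hkx : k = x
      · subst hkx
        simp [hk, PySem.Dict.getD_insert_self]
      · rw [PySem.Dict.getD_insert]
        simp [hk, hkx, List.mem_cons]

-- the common normal form: one row of cells per distinct strand, in first-insertion order
def normDict (L S : List String) (D : List (String × List (String × Int))) : PySem.Dict String (List Int) :=
  S.foldl (fun a s => a.insert s (L.map (fCell D s))) PySem.Dict.empty

theorem A_eq (L S : List String) (D : List (String × List (String × Int))) :
    fillDictWRTReferenceTypes L S D = (normDict L S D).items := by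
  unfold fillDictWRTReferenceTypes normDict
  have houter : (fun (acc : PySem.Dict String (List Int)) (strand : String) =>
      L.foldl (fun acc2 ty =>
          match (PySem.Dict.mk D).get? ty with
          | some sub =>
            match (PySem.Dict.mk sub).get? strand with
            | some count => acc2.modify strand [] (fun l => l ++ [count])
            | none => acc2.modify strand [] (fun l => l ++ [0])
          | none => acc2.modify strand [] (fun l => l ++ [0]))
        (acc.insert strand ([] : List Int)))
      = (fun acc strand => acc.insert strand (L.map (fCell D strand))) := by
    funext acc strand
    have hstep : (fun (acc2 : PySem.Dict String (List Int)) (ty : String) =>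
        match (PySem.Dict.mk D).get? ty with
        | some sub =>
          match (PySem.Dict.mk sub).get? strand with
          | some count => acc2.modify strand [] (fun l => l ++ [count])
          | none => acc2.modify strand [] (fun l => l ++ [0])
        | none => acc2.modify strand [] (fun l => l ++ [0]))
        = (fun acc2 ty => acc2.modify strand [] (fun l => l ++ [fCell D strand ty])) := by
      funext acc2 ty
      unfold fCell
      cases h1 : (PySem.Dict.mk D).get? ty with
      | none => simp only [h1]
      | some sub =>
        simp only [h1]
        cases h2 : (PySem.Dict.mk sub).get? strand with
        | none => simp only [Option.getD_none]
        | some c => simp only [Option.getD_some]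
    rw [hstep, modfold strand (fCell D strand) L acc []]
    rw [List.nil_append]
  rw [houter]

-- proof-only names for the three dict stages of B
def posDict (L : List String) : PySem.Dict String (List Nat) :=
  L.zipIdx.foldl (fun d p => d.modify p.1 [] (fun x => x ++ [p.2])) PySem.Dict.empty

def r0Dict (L S : List String) : PySem.Dict String (List Int) :=
  S.foldl (fun r strand => r.insert strand (List.replicate L.length 0)) PySem.Dict.empty

def scatDict (L S : List String) (D : List (String × List (String × Int))) :
    PySem.Dict String (List Int) :=
  D.foldl (fun r p =>
    ((posDict L).getD p.1 []).foldl (fun r i =>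
      p.2.foldl (fun r q =>
        match r.get? q.1 with
        | some row => r.insert q.1 (row.set i q.2)
        | none => r) r) r) (r0Dict L S)

theorem B_eq (L S : List String) (D : List (String × List (String × Int)))
    (hndD : (D.map Prod.fst).Nodup) (hndsub : ∀ p ∈ D, (p.2.map Prod.fst).Nodup) :
    fillDictWRTReferenceTypes_alt L S D = (normDict L S D).items := by
  show (scatDict L S D).items = (normDict L S D).items
  have hpos : ∀ t, (posDict L).getD t [] = idxsOf L t := by
    intro t
    unfold posDict
    rw [PySem.Dict.getD_foldl_modify_append, PySem.Dict.getD_empty]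
    rfl
  -- keys of every dict in sight
  have hkeysA : (normDict L S D).keys = PySem.Set.update ([] : List String) S := by
    have h : (normDict L S D).keys = PySem.Set.update PySem.Dict.empty.keys S :=
      PySem.Dict.keys_foldl_insert (ν := List Int) S (fun _ s => L.map (fCell D s)) PySem.Dict.empty
    rw [PySem.Dict.keys_empty] at h
    exact h
  have hkeysR0 : (r0Dict L S).keys = PySem.Set.update ([] : List String) S := by
    have h : (r0Dict L S).keys = PySem.Set.update PySem.Dict.empty.keys S :=
      PySem.Dict.keys_foldl_insert (ν := List Int) S
        (fun _ _ => List.replicate L.length (0 : Int)) PySem.Dict.empty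
    rw [PySem.Dict.keys_empty] at h
    exact h
  have hstepkeys : ∀ (p : String × List (String × Int)) (r : PySem.Dict String (List Int)),
      (((posDict L).getD p.1 []).foldl (fun r i =>
        p.2.foldl (fun r q =>
          match r.get? q.1 with
          | some row => r.insert q.1 (row.set i q.2)
          | none => r) r) r).keys = r.keys := by
    intro p r
    refine keys_foldl_of_keys_eq _ (fun r i => ?_) ((posDict L).getD p.1 []) r
    refine keys_foldl_of_keys_eq _ (fun r q => ?_) p.2 r
    exact atomic_keys r q i
  have hkeysB : (scatDict L S D).keys = (r0Dict L S).keys := by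
    unfold scatDict
    exact keys_foldl_of_keys_eq _ (fun r p => hstepkeys p r) D (r0Dict L S)
  have hnodupA : (normDict L S D).keys.Nodup := by
    refine PySem.Dict.nodup_keys_foldl_insert S (fun _ s => L.map (fCell D s)) PySem.Dict.empty ?_
    rw [PySem.Dict.keys_empty]
    exact List.nodup_nil
  have hnodupB : (scatDict L S D).keys.Nodup := by
    rw [hkeysB]
    refine PySem.Dict.nodup_keys_foldl_insert S (fun _ _ => List.replicate L.length (0 : Int))
      PySem.Dict.empty ?_
    rw [PySem.Dict.keys_empty]
    exact List.nodup_nil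
  -- the value each dict holds at a strand actually present
  have hvalA : ∀ k ∈ S, (normDict L S D).getD k [] = L.map (fCell D k) := by
    intro k hk
    have h : (normDict L S D).getD k []
        = if k ∈ S then L.map (fCell D k) else PySem.Dict.empty.getD k [] :=
      getD_foldl_insert_fun (fun s => L.map (fCell D s)) S PySem.Dict.empty k
    rw [if_pos hk] at h
    exact h
  have hvalB : ∀ k ∈ S, (scatDict L S D).getD k [] = L.map (fCell D k) := by
    intro k hk
    have hcont : (r0Dict L S).contains k = true := by
      rw [PySem.Dict.contains_iff_mem_keys, hkeysR0, PySem.Set.mem_update]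
      exact Or.inr hk
    have hr0val : (r0Dict L S).getD k [] = List.replicate L.length 0 := by
      have h : (r0Dict L S).getD k []
          = if k ∈ S then List.replicate L.length (0 : Int) else PySem.Dict.empty.getD k [] :=
        getD_foldl_insert_fun (fun _ => List.replicate L.length (0 : Int)) S PySem.Dict.empty k
      rw [if_pos hk] at h
      exact h
    have hstepval : ∀ (r : PySem.Dict String (List Int)) (p : String × List (String × Int)),
        r.contains k = true →
        (((posDict L).getD p.1 []).foldl (fun r i =>
          p.2.foldl (fun r q =>
            match r.get? q.1 with
            | some row => r.insert q.1 (row.set i q.2)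
            | none => r) r) r).getD k [] = eStepV L k (r.getD k []) p := by
      intro r p hc
      rw [hpos p.1]
      unfold eStepV
      refine getD_foldl_proj k _ _ ?_ ?_ (idxsOf L p.1) r hc
      · intro r i
        refine keys_foldl_of_keys_eq _ (fun r q => ?_) p.2 r
        exact atomic_keys r q i
      · intro r i hc'
        refine getD_foldl_proj k _ _ ?_ ?_ p.2 r hc'
        · intro r q
          exact atomic_keys r q i
        · intro r q hc''
          exact atomic_getD k r q i hc''
    have hproj : (scatDict L S D).getD k [] = D.foldl (eStepV L k) ((r0Dict L S).getD k []) := by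
      unfold scatDict
      exact getD_foldl_proj k _ (eStepV L k) (fun r p => hstepkeys p r) hstepval D (r0Dict L S) hcont
    rw [hproj, hr0val]
    exact scatterV L k D hndD hndsub
  -- items agree
  rw [PySem.Dict.items_eq_map_keys (scatDict L S D) hnodupB [],
      PySem.Dict.items_eq_map_keys (normDict L S D) hnodupA []]
  rw [hkeysB, hkeysR0, hkeysA]
  apply List.map_congr_left
  intro k hk
  have hkS : k ∈ S := by
    rcases (PySem.Set.mem_update ([] : List String) S k).mp hk with h | h
    · cases h
    · exact h
  rw [hvalA k hkS, hvalB k hkS]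

-- ===== VERDICT (by name: the statement is the Claim_ definition above) =====
theorem fillDictWRTReferenceTypes_spec : Claim_equal_fillDictWRTReferenceTypes := by
  unfold Claim_equal_fillDictWRTReferenceTypes
  intro L S D _ hpre
  unfold Spec_fillDictWRTReferenceTypes
  exact (A_eq L S D).trans (B_eq L S D hpre.1 hpre.2).symm
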